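-- pv_equiv track=rewrite | github.com/deeksha-4/LS_Cryptography | script.py | englishFreqMatchScore
-- ===== SOURCE A (Python) =====
-- LETTERS = 'ABCDEFGHIJKLMNOPQRSTUVWXYZ'
--
-- ETAOIN = 'ETAOINSHRDLCUMWFGYPBVKJXQZ'
--
-- def getLetterCount(message):
--     # Returns a dictionary with keys of single letters and values of the
--     # count of how many times they appear in the message parameter:
--     letterCount = {'A': 0, 'B': 0, 'C': 0, 'D': 0, 'E': 0, 'F': 0, 'G': 0, 'H': 0, 'I': 0, 'J': 0, 'K': 0, 'L': 0, 'M': 0, 'N': 0, 'O': 0, 'P': 0, 'Q': 0, 'R': 0, 'S': 0, 'T': 0, 'U': 0, 'V': 0, 'W': 0, 'X': 0, 'Y': 0, 'Z': 0}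
--
--     for letter in message.upper():
--         if letter in LETTERS:
--             letterCount[letter] += 1
--
--     return letterCount
--
-- def getItemAtIndexZero(items):
--     return items[0]
--
-- def getFrequencyOrder(message):
--     # Returns a string of the alphabet letters arranged in order of most
--     # frequently occurring in the message parameter.
--
--     # First, get a dictionary of each letter and its frequency count:
--     letterToFreq = getLetterCount(message)
--
--     # Second, make a dictionary of each frequency count to each letter(s)
--     # with that frequency:
--     freqToLetter = {}
--     for letter in LETTERS:
--         if letterToFreq[letter] not in freqToLetter:
--             freqToLetter[letterToFreq[letter]] = [letter]
--         else:
--             freqToLetter[letterToFreq[letter]].append(letter)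
--
--     # Third, put each list of letters in reverse "ETAOIN" order, and then
--     # convert it to a string:
--     for freq in freqToLetter:
--         freqToLetter[freq].sort(key=ETAOIN.find, reverse=True)
--         freqToLetter[freq] = ''.join(freqToLetter[freq])
--
--     # Fourth, convert the freqToLetter dictionary to a list of
--     # tuple pairs (key, value), then sort them:
--     freqPairs = list(freqToLetter.items())
--     freqPairs.sort(key=getItemAtIndexZero, reverse=True)
--
--     # Fifth, now that the letters are ordered by frequency, extract all
--     # the letters for the final string:
--     freqOrder = []
--     for freqPair in freqPairs:
--         freqOrder.append(freqPair[1])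
--
--     return ''.join(freqOrder)
--
-- def englishFreqMatchScore(message):
--     # Return the number of matches that the string in the message
--     # parameter has when its letter frequency is compared to English
--     # letter frequency. A "match" is how many of its six most frequent
--     # and six least frequent letters is among the six most frequent and
--     # six least frequent letters for English.
--     freqOrder = getFrequencyOrder(message)
--
--     matchScore = 0
--     # Find how many matches for the six most common letters there are:
--     for commonLetter in ETAOIN[:6]:
--         if commonLetter in freqOrder[:6]:
--             matchScore += 1
--     # Find how many matches for the six least common letters there are:
--     for uncommonLetter in ETAOIN[-6:]:
--         if uncommonLetter in freqOrder[-6:]: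
--             matchScore += 1
--
--     return matchScore
-- ===== SOURCE B (Python) =====
-- LETTERS = 'ABCDEFGHIJKLMNOPQRSTUVWXYZ'
--
-- ETAOIN = 'ETAOINSHRDLCUMWFGYPBVKJXQZ'
--
-- def englishFreqMatchScore(message):
--     # Count the letters once, then replace the whole bucketing pipeline
--     # (count->letters dict, per-bucket sort, items sort, concatenation) with a
--     # single descending sort of the 26 letters.  The weight counts[c] * 26 +
--     # ETAOIN.find(c) compares lexicographically by (count, ETAOIN position)
--     # because the ETAOIN rank lies in 0..25, so sorting it descending orders
--     # letters by count descending with ties broken by descending ETAOIN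
--     # position -- the same order the bucketing pipeline produces.
--     counts = {c: 0 for c in LETTERS}
--     for ch in message.upper():
--         if ch in LETTERS:
--             counts[ch] += 1
--
--     freqOrder = ''.join(sorted(LETTERS,
--                                key=lambda c: counts[c] * 26 + ETAOIN.find(c),
--                                reverse=True))
--
--     score = 0
--     for commonLetter in ETAOIN[:6]:
--         if commonLetter in freqOrder[:6]:
--             score += 1
--     for uncommonLetter in ETAOIN[-6:]:
--         if uncommonLetter in freqOrder[-6:]:
--             score += 1
--     return score
-- ===== Notes on version B (the rewrite author's own statement) =====
-- stated objective: simpler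
-- what changed: The count->letters bucketing dict, the per-bucket reverse-ETAOIN sorts, the items sort and the concatenation are all replaced by a single descending sort of the 26 letters under the combined key counts[c]*26 + ETAOIN.find(c), which orders by count descending with ties broken by descending ETAOIN position exactly as the pipeline does.
import Mathlib
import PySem

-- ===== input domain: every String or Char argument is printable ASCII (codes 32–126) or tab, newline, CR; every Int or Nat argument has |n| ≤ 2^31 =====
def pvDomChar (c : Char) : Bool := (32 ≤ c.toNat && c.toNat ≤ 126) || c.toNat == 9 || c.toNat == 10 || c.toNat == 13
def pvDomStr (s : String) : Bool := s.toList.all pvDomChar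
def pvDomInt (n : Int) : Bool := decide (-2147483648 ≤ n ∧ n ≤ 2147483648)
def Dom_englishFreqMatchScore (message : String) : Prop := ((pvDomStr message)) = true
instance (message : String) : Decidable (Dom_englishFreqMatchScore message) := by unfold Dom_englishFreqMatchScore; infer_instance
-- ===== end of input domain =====

-- B replaces A's bucketing pipeline (count->letters dict, per-bucket sorts, items sort,
-- concatenation) by one descending sort of the 26 letters under the combined key
-- count*26 + ETAOIN-rank; same return value, objective: simpler.

-- ===== PORT A =====
-- Python strings of letters are ported as List Char (PySem.Chars is exact on this ASCII data).
def pvLETTERS : List Char := "ABCDEFGHIJKLMNOPQRSTUVWXYZ".toList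

def pvETAOIN : List Char := "ETAOINSHRDLCUMWFGYPBVKJXQZ".toList

-- the literal dict {'A': 0, …, 'Z': 0} written as its 26 (letter, 0) entries
def getLetterCount (message : String) : PySem.Dict Char Int :=
  let letterCount : PySem.Dict Char Int := PySem.Dict.mk (pvLETTERS.map (fun c => (c, (0 : Int))))
  (PySem.Str.upper message).toList.foldl
    (fun d letter => if pvLETTERS.contains letter then d.modify letter 0 (· + 1) else d)
    letterCount

def getItemAtIndexZero (items : Int × List Char) : Int := items.1

def getFrequencyOrder (message : String) : List Char :=
  let letterToFreq := getLetterCount message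
  -- letterToFreq[letter] : the key is always present (all 26 letters are), so .getD is exact
  let freqToLetter : PySem.Dict Int (List Char) :=
    pvLETTERS.foldl
      (fun d letter =>
        if d.contains (letterToFreq.getD letter 0) = false then
          d.insert (letterToFreq.getD letter 0) [letter]
        else
          d.modify (letterToFreq.getD letter 0) [] (· ++ [letter]))
      PySem.Dict.empty
  -- for freq in freqToLetter: in-place sort of each value; ''.join of single-char
  -- strings is the char list itself, so the value stays a List Char
  let freqToLetter :=
    freqToLetter.keys.foldl
      (fun d freq =>
        d.modify freq [] (fun v => PySem.List.sorted v (fun c => PySem.Chars.find pvETAOIN [c]) true))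
      freqToLetter
  let freqPairs := freqToLetter.items
  let freqPairs := PySem.List.sorted freqPairs getItemAtIndexZero true
  let freqOrder := freqPairs.foldl (fun acc freqPair => acc ++ [freqPair.2]) ([] : List (List Char))
  PySem.Chars.join [] freqOrder

def englishFreqMatchScore (message : String) : Int :=
  let freqOrder := getFrequencyOrder message
  let matchScore : Int := 0
  -- 'commonLetter in freqOrder[:6]': single-character membership, so .contains is exact
  let matchScore :=
    (PySem.List.slice pvETAOIN none (some 6)).foldl
      (fun acc commonLetter =>
        if (PySem.List.slice freqOrder none (some 6)).contains commonLetter then acc + 1 else acc)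
      matchScore
  let matchScore :=
    (PySem.List.slice pvETAOIN (some (-6)) none).foldl
      (fun acc uncommonLetter =>
        if (PySem.List.slice freqOrder (some (-6)) none).contains uncommonLetter then acc + 1 else acc)
      matchScore
  matchScore

-- ===== PORT B =====
def englishFreqMatchScore_alt (message : String) : Int :=
  -- counts = {c: 0 for c in LETTERS}
  let counts : PySem.Dict Char Int := PySem.Dict.mk (pvLETTERS.map (fun c => (c, (0 : Int))))
  let counts :=
    (PySem.Str.upper message).toList.foldl
      (fun d ch => if pvLETTERS.contains ch then d.modify ch 0 (· + 1) else d)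
      counts
  -- one descending sort under the combined key counts[c]*26 + ETAOIN.find(c)
  let freqOrder :=
    PySem.List.sorted pvLETTERS
      (fun c => counts.getD c 0 * 26 + PySem.Chars.find pvETAOIN [c]) true
  let score : Int := 0
  let score :=
    (PySem.List.slice pvETAOIN none (some 6)).foldl
      (fun acc commonLetter =>
        if (PySem.List.slice freqOrder none (some 6)).contains commonLetter then acc + 1 else acc)
      score
  let score :=
    (PySem.List.slice pvETAOIN (some (-6)) none).foldl
      (fun acc uncommonLetter =>
        if (PySem.List.slice freqOrder (some (-6)) none).contains uncommonLetter then acc + 1 else acc)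
      score
  score

-- ===== PRECONDITION & SPEC =====
def Spec_englishFreqMatchScore (message : String) (out : Int) : Prop := out = englishFreqMatchScore_alt message
instance (message : String) (out : Int) : Decidable (Spec_englishFreqMatchScore message out) := by unfold Spec_englishFreqMatchScore; infer_instance

-- ===== CLAIM (what is proved, stated in full; the proofs are below) =====
def Claim_equal_englishFreqMatchScore : Prop := ∀ (message : String), Dom_englishFreqMatchScore message → Spec_englishFreqMatchScore message (englishFreqMatchScore message)

-- ===== LEMMAS AND PROOFS =====

lemma join_nil_flatten (parts : List (List Char)) : PySem.Chars.join [] parts = parts.flatten := by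
  match parts with
  | [] => simp [PySem.Chars.join_nil]
  | [p] => simp [PySem.Chars.join, List.intercalate]
  | p :: q :: rest =>
      rw [PySem.Chars.join_cons_cons]
      simp [join_nil_flatten (q :: rest)]

lemma set_update_self {α : Type} [BEq α] [LawfulBEq α] (xs : List α) (s : PySem.Set α)
    (h : ∀ x ∈ xs, x ∈ s) : PySem.Set.update s xs = s := by
  induction xs generalizing s with
  | nil => rfl
  | cons x xs ih =>
      have hx : PySem.Set.add s x = s := PySem.Set.add_of_mem (h x (by simp))
      show PySem.Set.update (PySem.Set.add s x) xs = s
      rw [hx]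
      exact ih s (fun y hy => h y (by simp [hy]))

lemma getD_foldl_modify_nodup {ν : Type} (g : ν → ν) (d0 : ν) (ks : List Int) (d : PySem.Dict Int ν)
    (h : ks.Nodup) (v : Int) :
    (ks.foldl (fun d k => d.modify k d0 g) d).getD v d0
      = if v ∈ ks then g (d.getD v d0) else d.getD v d0 := by
  induction ks generalizing d with
  | nil => simp
  | cons k ks ih =>
      simp only [List.foldl_cons]
      rcases List.nodup_cons.mp h with ⟨hk, hks⟩
      by_cases hv : v = k
      · subst hv
        rw [ih _ hks, if_neg hk, PySem.Dict.getD_modify_self]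
        simp
      · rw [ih _ hks, PySem.Dict.getD_modify_of_ne _ _ _ hv]
        simp [hv]

lemma flatMap_filter_perm (key : Char → Int) (ks : List Int) (hnd : ks.Nodup) :
    ∀ (l : List Char), (∀ x ∈ l, key x ∈ ks) →
    (ks.flatMap (fun f => l.filter (fun c => key c == f))).Perm l := by
  induction ks with
  | nil =>
      intro l h
      have : l = [] := List.eq_nil_iff_forall_not_mem.mpr (fun x hx => by simpa using h x hx)
      simp [this]
  | cons k ks ih =>
      intro l h
      rcases List.nodup_cons.mp hnd with ⟨hk, hks⟩
      rw [List.flatMap_cons]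
      have hcong : ks.flatMap (fun f => l.filter (fun c => key c == f))
          = ks.flatMap (fun f => (l.filter (fun c => !(key c == k))).filter (fun c => key c == f)) := by
        rw [List.flatMap_def, List.flatMap_def]
        congr 1
        apply List.map_congr_left
        intro f hf
        rw [List.filter_filter]
        apply List.filter_congr
        intro c _
        by_cases hc : key c = f
        · have : ¬ (key c = k) := by rintro rfl; exact hk (hc ▸ hf)
          subst hc; simp [this]
        · simp [hc]
      rw [hcong]
      have hrest : (ks.flatMap (fun f => (l.filter (fun c => !(key c == k))).filter (fun c => key c == f))).Perm
          (l.filter (fun c => !(key c == k))) := by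
        apply ih hks
        intro x hx
        rcases List.mem_filter.mp hx with ⟨hxl, hxk⟩
        have := h x hxl
        simp only [List.mem_cons] at this
        rcases this with h1 | h1
        · simp [h1] at hxk
        · exact h1
      exact (hrest.append_left _).trans (List.filter_append_perm _ l)

lemma pvLETTERS_nodup : pvLETTERS.Nodup := by decide
lemma fnd_boundsB : pvLETTERS.all (fun c => decide (0 ≤ PySem.Chars.find pvETAOIN [c]) && decide (PySem.Chars.find pvETAOIN [c] < 26)) = true := by decide
lemma fnd_injB : pvLETTERS.all (fun a => pvLETTERS.all (fun b => decide (a = b) || !decide (PySem.Chars.find pvETAOIN [a] = PySem.Chars.find pvETAOIN [b]))) = true := by decide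

lemma fnd_bounds : ∀ c ∈ pvLETTERS, 0 ≤ PySem.Chars.find pvETAOIN [c] ∧ PySem.Chars.find pvETAOIN [c] < 26 := by
  have h := fnd_boundsB
  rw [List.all_eq_true] at h
  intro c hc
  simpa using h c hc

lemma fnd_inj : ∀ a ∈ pvLETTERS, ∀ b ∈ pvLETTERS,
    PySem.Chars.find pvETAOIN [a] = PySem.Chars.find pvETAOIN [b] → a = b := by
  have h := fnd_injB
  rw [List.all_eq_true] at h
  intro a ha b hb heq
  have := h a ha
  rw [List.all_eq_true] at this
  have := this b hb
  simp at this
  rcases this with h1 | h1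
  · exact h1
  · exact absurd heq h1
set_option maxHeartbeats 2000000 in

theorem main_lemma (cnt : Char → Int) :
    PySem.Chars.join []
      ((PySem.List.sorted
          ((pvLETTERS.foldl
              (fun d letter =>
                if d.contains (cnt letter) = false then d.insert (cnt letter) [letter]
                else d.modify (cnt letter) [] (· ++ [letter]))
              PySem.Dict.empty).keys.foldl
            (fun d freq =>
              d.modify freq [] (fun v => PySem.List.sorted v (fun c => PySem.Chars.find pvETAOIN [c]) true))
            (pvLETTERS.foldl
              (fun d letter =>
                if d.contains (cnt letter) = false then d.insert (cnt letter) [letter]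
                else d.modify (cnt letter) [] (· ++ [letter]))
              PySem.Dict.empty)).items
          getItemAtIndexZero true).foldl (fun acc freqPair => acc ++ [freqPair.2]) [])
    = PySem.List.sorted pvLETTERS (fun c => cnt c * 26 + PySem.Chars.find pvETAOIN [c]) true := by
  -- abbreviations
  have h1 : (pvLETTERS.foldl
      (fun d letter =>
        if d.contains (cnt letter) = false then d.insert (cnt letter) [letter]
        else d.modify (cnt letter) [] (· ++ [letter]))
      PySem.Dict.empty)
      = pvLETTERS.foldl (fun d letter => d.modify (cnt letter) [] (· ++ [letter])) PySem.Dict.empty := by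
    apply PySem.List.foldl_congr_mem
    intro acc x _
    by_cases hc : acc.contains (cnt x) = false
    · rw [if_pos hc]
      simp [PySem.Dict.modify, PySem.Dict.getD_of_not_contains _ _ hc]
    · rw [if_neg hc]
  rw [h1]
  set bucketM := pvLETTERS.foldl (fun d letter => d.modify (cnt letter) [] (· ++ [letter])) PySem.Dict.empty with hbM
  set K : List Int := PySem.Set.ofList (pvLETTERS.map cnt) with hK
  have hnodK : K.Nodup := PySem.Set.nodup_ofList _
  have hget : ∀ f : Int, bucketM.getD f [] = pvLETTERS.filter (fun c => cnt c == f) := by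
    intro f
    have hm : bucketM = (pvLETTERS.map (fun c => (cnt c, c))).foldl
        (fun d p => d.modify p.1 [] (· ++ [p.2])) PySem.Dict.empty := by
      rw [hbM, List.foldl_map]
    rw [hm, PySem.Dict.getD_foldl_modify_append]
    simp [List.filter_map, List.map_map, Function.comp_def]
  have hkeys : bucketM.keys = K := by
    rw [hbM, PySem.Dict.keys_foldl_modify_key pvLETTERS cnt [] (fun _ x => (· ++ [x]))]
    rfl
  set sortf : List Char → List Char :=
    fun v => PySem.List.sorted v (fun c => PySem.Chars.find pvETAOIN [c]) true with hsf
  set d2 := bucketM.keys.foldl (fun d freq => d.modify freq [] sortf) bucketM with hd2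
  have hkeys2 : d2.keys = K := by
    rw [hd2, PySem.Dict.keys_foldl_modify bucketM.keys [] (fun _ _ => sortf), hkeys]
    exact set_update_self K K (fun x hx => hx)
  have hget2 : ∀ f ∈ K, d2.getD f [] = sortf (pvLETTERS.filter (fun c => cnt c == f)) := by
    intro f hf
    rw [hd2, hkeys, getD_foldl_modify_nodup sortf [] K bucketM hnodK f, if_pos hf, hget]
  have hitems : d2.items = K.map (fun f => (f, sortf (pvLETTERS.filter (fun c => cnt c == f)))) := by
    rw [PySem.Dict.items_eq_map_keys d2 (hkeys2 ▸ hnodK) [], hkeys2]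
    exact List.map_congr_left (fun f hf => by rw [hget2 f hf])
  rw [hitems]
  set Ks := PySem.List.sorted K (fun x => x) true with hKs
  have hKsnd : Ks.Nodup := (PySem.List.sorted_perm K (fun x => x) true).nodup_iff.mpr hnodK
  have hKsgt : Ks.Pairwise (fun a b => b < a) := by
    have hle := PySem.List.sorted_pairwise_rev K (fun x => x)
    rw [← hKs] at hle
    exact (hle.and hKsnd).imp (fun h => lt_of_le_of_ne h.1 (fun e => h.2 e.symm))
  set g : Int → Int × List Char := fun f => (f, sortf (pvLETTERS.filter (fun c => cnt c == f))) with hg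
  have hsorted : PySem.List.sorted (K.map g) getItemAtIndexZero true = Ks.map g := by
    apply PySem.List.sorted_rev_eq_of_perm_of_pairwise_gt
    · exact (PySem.List.sorted_perm K (fun x => x) true).map g
    · rw [List.pairwise_map]
      exact hKsgt.imp (fun h => by simpa [hg, getItemAtIndexZero] using h)
  rw [hsorted]
  simp only [PySem.List.foldl_append_singleton_eq_map]
  rw [join_nil_flatten]
  simp only [List.nil_append, List.map_map]
  -- now: flatten (Ks.map ((·.2) ∘ g)) = sorted pvLETTERS wkey true
  symm
  apply PySem.List.sorted_rev_eq_of_perm_of_pairwise_gt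
  · -- permutation
    rw [← List.flatMap_def]
    have p1 : (Ks.flatMap fun f => ((fun p => p.2) ∘ g) f).Perm
        (Ks.flatMap fun f => pvLETTERS.filter (fun c => cnt c == f)) := by
      apply List.Perm.flatMap (List.Perm.refl Ks)
      intro f _
      exact PySem.List.sorted_perm _ _ _
    have p2 : (Ks.flatMap fun f => pvLETTERS.filter (fun c => cnt c == f)).Perm
        (K.flatMap fun f => pvLETTERS.filter (fun c => cnt c == f)) := by
      exact List.Perm.flatMap (PySem.List.sorted_perm K (fun x => x) true) (fun f _ => List.Perm.refl _)
    exact (p1.trans p2).trans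
      (flatMap_filter_perm cnt K hnodK pvLETTERS
        (fun x hx => (PySem.Set.mem_ofList _ _).mpr (List.mem_map_of_mem hx)))
  · -- pairwise strictly descending under the combined key
    rw [List.pairwise_flatten]
    constructor
    · intro l' hl'
      rcases List.mem_map.mp hl' with ⟨f, hf, rfl⟩
      have hpw := PySem.List.sorted_pairwise_rev (pvLETTERS.filter (fun c => cnt c == f))
        (fun c => PySem.Chars.find pvETAOIN [c])
      have hnd : (sortf (pvLETTERS.filter (fun c => cnt c == f))).Nodup :=
        (PySem.List.sorted_perm _ _ _).nodup_iff.mpr (pvLETTERS_nodup.filter _)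
      have hmem : ∀ x ∈ sortf (pvLETTERS.filter (fun c => cnt c == f)),
          x ∈ pvLETTERS ∧ cnt x = f := by
        intro x hx
        rw [hsf, PySem.List.mem_sorted] at hx
        rcases List.mem_filter.mp hx with ⟨hxl, hxf⟩
        exact ⟨hxl, by simpa using hxf⟩
      refine ((hpw.and hnd).imp_of_mem ?_)
      intro a b ha hb hab
      rcases hmem a ha with ⟨haL, haf⟩
      rcases hmem b hb with ⟨hbL, hbf⟩
      have hne : PySem.Chars.find pvETAOIN [a] ≠ PySem.Chars.find pvETAOIN [b] := by
        intro e
        exact hab.2 (fnd_inj a haL b hbL e)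
      have hlt : PySem.Chars.find pvETAOIN [b] < PySem.Chars.find pvETAOIN [a] :=
        lt_of_le_of_ne hab.1 (fun e => hne e.symm)
      rw [haf, hbf]
      omega
    · rw [List.pairwise_map]
      apply hKsgt.imp_of_mem
      intro f f' hf hf' hlt x hx y hy
      have hmemf : ∀ f₀, ∀ x ∈ ((fun p => p.2) ∘ g) f₀, x ∈ pvLETTERS ∧ cnt x = f₀ := by
        intro f₀ x hx
        simp only [Function.comp, hg] at hx
        rw [hsf, PySem.List.mem_sorted] at hx
        rcases List.mem_filter.mp hx with ⟨hxl, hxf⟩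
        exact ⟨hxl, by simpa using hxf⟩
      rcases hmemf f x hx with ⟨hxL, hxf⟩
      rcases hmemf f' y hy with ⟨hyL, hyf⟩
      rcases fnd_bounds x hxL with ⟨hx0, _⟩
      rcases fnd_bounds y hyL with ⟨_, hy26⟩
      rw [hxf, hyf]
      omega


-- ===== VERDICT (by name: the statement is the Claim_ definition above) =====
theorem englishFreqMatchScore_spec : Claim_equal_englishFreqMatchScore := by
  intro message _
  unfold Spec_englishFreqMatchScore englishFreqMatchScore englishFreqMatchScore_alt
    getFrequencyOrder getLetterCount
  rw [main_lemma]
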